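-- pv_equiv track=rewrite | github.com/EmnaKsontini/DRminer-MSR24 | Matching.py | matchingInstructions
-- ===== SOURCE A (Python) =====
-- def matchingInstructions(c1, c2, MI):
--
--     count = 0
--     for inst1 in c1:
--         for inst2 in c2:
--             if (inst1, inst2) in MI:
--                 count += 1
--                 break
--     return count
-- ===== SOURCE B (Python) =====
-- def matchingInstructions(c1, c2, MI):
--     c2set = set(c2)
--     S = {a for (a, b) in MI if b in c2set}
--     return sum(1 for inst1 in c1 if inst1 in S)
-- ===== Notes on version B (the rewrite author's own statement) =====
-- stated objective: faster
-- what changed: Replaces the nested c1*c2 scan with a repeated list membership test by one pass over MI building the set of left instructions whose partner is in set(c2), then a single membership count over c1.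
import Mathlib
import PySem

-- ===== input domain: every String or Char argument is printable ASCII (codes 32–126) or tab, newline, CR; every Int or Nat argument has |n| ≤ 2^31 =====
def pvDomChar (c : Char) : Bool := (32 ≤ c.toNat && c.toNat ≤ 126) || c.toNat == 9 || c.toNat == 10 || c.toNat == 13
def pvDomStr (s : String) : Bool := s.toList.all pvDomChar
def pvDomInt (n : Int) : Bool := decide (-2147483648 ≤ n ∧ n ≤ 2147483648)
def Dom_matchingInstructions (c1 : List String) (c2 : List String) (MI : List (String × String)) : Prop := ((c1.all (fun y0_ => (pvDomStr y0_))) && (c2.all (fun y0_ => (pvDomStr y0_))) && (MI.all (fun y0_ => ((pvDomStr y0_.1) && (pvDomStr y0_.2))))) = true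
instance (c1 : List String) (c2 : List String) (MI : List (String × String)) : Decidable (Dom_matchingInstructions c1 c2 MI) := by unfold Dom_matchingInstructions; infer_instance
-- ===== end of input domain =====

-- B replaces A's nested c1×c2 scan (with list membership in MI) by one pass over MI building the set of left instructions whose partner is in set(c2), then a single membership count over c1; measured faster.


-- ===== PORT A =====
-- inner 'for inst2 in c2: if (inst1, inst2) in MI: count += 1; break'
def pvInnerA (MI : List (String × String)) (inst1 : String) (count : Int) : List String → Int
  | [] => count
  | inst2 :: rest => if (inst1, inst2) ∈ MI then count + 1 else pvInnerA MI inst1 count rest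

def matchingInstructions (c1 : List String) (c2 : List String) (MI : List (String × String)) : Int :=
  c1.foldl (fun count inst1 => pvInnerA MI inst1 count c2) 0

-- ===== PORT B =====
def matchingInstructions_alt (c1 : List String) (c2 : List String) (MI : List (String × String)) : Int :=
  let c2set : PySem.Set String := PySem.Set.ofList c2
  let S : PySem.Set String :=
    MI.foldl (fun s p => if PySem.Set.contains c2set p.2 then PySem.Set.add s p.1 else s) PySem.Set.empty
  c1.foldl (fun acc inst1 => if PySem.Set.contains S inst1 then acc + 1 else acc) 0

-- ===== PRECONDITION & SPEC =====
def Spec_matchingInstructions (c1 : List String) (c2 : List String) (MI : List (String × String)) (out : Int) : Prop := out = matchingInstructions_alt c1 c2 MI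
instance (c1 : List String) (c2 : List String) (MI : List (String × String)) (out : Int) : Decidable (Spec_matchingInstructions c1 c2 MI out) := by unfold Spec_matchingInstructions; infer_instance

-- ===== CLAIM (what is proved, stated in full; the proofs are below) =====
def Claim_equal_matchingInstructions : Prop := ∀ (c1 : List String) (c2 : List String) (MI : List (String × String)), Dom_matchingInstructions c1 c2 MI → Spec_matchingInstructions c1 c2 MI (matchingInstructions c1 c2 MI)

-- ===== LEMMAS AND PROOFS =====

-- ===== VERDICT (by name: the statement is the Claim_ definition above) =====
-- A's inner loop adds 1 iff some inst2 in c2 pairs with inst1 in MI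
lemma pvInnerA_eq (MI : List (String × String)) (a : String) (count : Int) (c2 : List String) :
    pvInnerA MI a count c2 = count + (if ∃ b ∈ c2, (a, b) ∈ MI then 1 else 0) := by
  induction c2 with
  | nil => simp [pvInnerA]
  | cons b rest ih =>
    simp only [pvInnerA]
    by_cases h : (a, b) ∈ MI
    · simp [h]
    · rw [if_neg h, ih]
      have hiff : (∃ x ∈ b :: rest, (a, x) ∈ MI) ↔ (∃ x ∈ rest, (a, x) ∈ MI) := by
        constructor
        · rintro ⟨x, hx, hm⟩
          rcases List.mem_cons.1 hx with rfl | hx'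
          · exact absurd hm h
          · exact ⟨x, hx', hm⟩
        · rintro ⟨x, hx, hm⟩
          exact ⟨x, List.mem_cons_of_mem _ hx, hm⟩
      rw [if_congr hiff rfl rfl]

-- membership in B's set S characterised
lemma pvMem_S (MI : List (String × String)) (c2 : List String) (s : PySem.Set String) (a : String) :
    a ∈ MI.foldl (fun s p => if PySem.Set.contains (PySem.Set.ofList c2) p.2 then PySem.Set.add s p.1 else s) s ↔
      a ∈ s ∨ ∃ b ∈ c2, (a, b) ∈ MI := by
  induction MI generalizing s with
  | nil => simp
  | cons p rest ih =>
    simp only [List.foldl_cons]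
    by_cases h : PySem.Set.contains (PySem.Set.ofList c2) p.2 = true
    · rw [if_pos h, ih]
      have hb : p.2 ∈ c2 := (PySem.Set.mem_ofList _ _).1 ((PySem.Set.contains_iff _ _).1 h)
      constructor
      · rintro (hs | ⟨b, hbc, hm⟩)
        · rcases (PySem.Set.mem_add _ _ _).1 hs with hs | rfl
          · exact Or.inl hs
          · exact Or.inr ⟨p.2, hb, by simp⟩
        · exact Or.inr ⟨b, hbc, List.mem_cons_of_mem _ hm⟩
      · rintro (hs | ⟨b, hbc, hm⟩)
        · exact Or.inl ((PySem.Set.mem_add _ _ _).2 (Or.inl hs))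
        · rcases List.mem_cons.1 hm with he | hm'
          · exact Or.inl ((PySem.Set.mem_add _ _ _).2 (Or.inr (by rw [← he])))
          · exact Or.inr ⟨b, hbc, hm'⟩
    · rw [if_neg h, ih]
      have hb : p.2 ∉ c2 := fun hc => h ((PySem.Set.contains_iff _ _).2 ((PySem.Set.mem_ofList _ _).2 hc))
      constructor
      · rintro (hs | ⟨b, hbc, hm⟩)
        · exact Or.inl hs
        · exact Or.inr ⟨b, hbc, List.mem_cons_of_mem _ hm⟩
      · rintro (hs | ⟨b, hbc, hm⟩)
        · exact Or.inl hs
        · rcases List.mem_cons.1 hm with he | hm'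
          · exact absurd (by rw [show p.2 = b from congrArg Prod.snd he.symm]; exact hbc) hb
          · exact Or.inr ⟨b, hbc, hm'⟩

-- the two outer folds agree once S characterises A's inner-loop condition
lemma pvFoldl_eq (c2 : List String) (MI : List (String × String)) (S : PySem.Set String)
    (hS : ∀ a : String, (∃ b ∈ c2, (a, b) ∈ MI) ↔ a ∈ S) (c1 : List String) (acc : Int) :
    c1.foldl (fun count a => pvInnerA MI a count c2) acc =
      c1.foldl (fun acc a => if PySem.Set.contains S a then acc + 1 else acc) acc := by
  induction c1 generalizing acc with
  | nil => rfl
  | cons x xs ih =>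
    simp only [List.foldl_cons]
    rw [pvInnerA_eq]
    by_cases h : ∃ b ∈ c2, (x, b) ∈ MI
    · rw [if_pos h, if_pos ((PySem.Set.contains_iff S x).2 ((hS x).1 h))]
      exact ih _
    · have hc : ¬ PySem.Set.contains S x = true :=
        fun hc => h ((hS x).2 ((PySem.Set.contains_iff S x).1 hc))
      rw [if_neg h, if_neg hc, add_zero]
      exact ih _

-- ===== VERDICT (by name: the statement is the Claim_ definition above) =====
theorem matchingInstructions_spec : Claim_equal_matchingInstructions := by
  intro c1 c2 MI _
  unfold Spec_matchingInstructions matchingInstructions matchingInstructions_alt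
  exact pvFoldl_eq c2 MI _
    (fun a => by
      constructor
      · intro h
        exact (pvMem_S MI c2 PySem.Set.empty a).2 (Or.inr h)
      · intro h
        rcases (pvMem_S MI c2 PySem.Set.empty a).1 h with hs | he
        · exact absurd hs (by simp [PySem.Set.empty])
        · exact he)
    c1 0
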